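-- pv_equiv track=rewrite | github.com/tifudquin/GetAhead-Week6 | week6.py | get_shortest_word
-- ===== SOURCE A (Python) =====
-- from collections import Counter
-- import math
--
-- def get_shortest_word(licence_plates, dictionary):
--
-- 	"""Finds the shortest word form a vocabulary that includes
-- 		all the letters from a given licence plate.
--
--     Args:
--         licence_plates: A list of licence plates
--         dictionary: The reference that will be used to form
--         	a vocabulary given the letters from a licence plate
--
--     Returns:
--         A list that contains the shortest words of all the licence plates
--     """
--
-- 	shortest_words_arr = []
--
-- 	for licence in licence_plates:
--
-- 		shortest_word = ""
-- 		shortest_word_length = math.inf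
--
-- 		# Get the letters in licence
-- 		licence_letters = [char for char in licence.lower() if char.isalpha()]
--
-- 		# If there are no letters in licence
-- 		if len(licence_letters) == 0:
-- 			shortest_words_arr.append("")
-- 			continue
--
-- 		licence_hash = Counter(licence_letters)
--
-- 		for word in dictionary:
-- 			counter = 0 # Used to track whether the current word has all the letters in licence
-- 			word_hash = Counter(word.lower())
--
-- 			for key in licence_hash.keys():
--
-- 				# If the number of occurence of a letter in licence is
-- 				# greater than or equal to the number of occurence of a letter in word
-- 				if word_hash.get(key, 0) >= licence_hash[key]:
-- 					counter += 1
--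
-- 			# If all the letters in licence are in word AND
-- 			# if length of word == length of all letters in licence,
-- 			# then the word is the shortest word, so break the loop
-- 			# because there's no need to go through other words in dictionary
-- 			if counter == len(licence_hash.keys()) and len(licence_letters) == len(word):
-- 				shortest_word = word
-- 				break
--
-- 			# If the current word is shorter than the shortest_word_length
-- 			if counter == len(licence_hash.keys()) and shortest_word_length > len(word):
-- 				shortest_word_length = len(word)
-- 				shortest_word = word
--
-- 		# Append the shortest word that can be formed using the current licence plate
-- 		shortest_words_arr.append(shortest_word)
--
-- 	return shortest_words_arr
-- ===== SOURCE B (Python) =====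
-- from collections import Counter
--
--
-- def get_shortest_word(licence_plates, dictionary):
--     # Sort once: stable length order, so the first covering word is the
--     # earliest-original word of minimal length.
--     by_len = sorted(dictionary, key=len)
--     results = []
--     for licence in licence_plates:
--         needed = Counter(c for c in licence.lower() if c.isalpha())
--         if not needed:
--             results.append("")
--             continue
--         results.append(next((w for w in by_len
--                              if not (needed - Counter(w.lower()))), ""))
--     return results
-- ===== Notes on version B (the rewrite author's own statement) =====
-- stated objective: alternative
-- what changed: Instead of scanning the whole dictionary per plate while tracking a running minimum length with an infinity sentinel and an exact-length early break, B stably sorts the dictionary once by word length and then returns the first length-sorted word whose lowercased Counter covers the plate's needed letters (Counter subtraction), so no min-length bookkeeping exists at all.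
import Mathlib
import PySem

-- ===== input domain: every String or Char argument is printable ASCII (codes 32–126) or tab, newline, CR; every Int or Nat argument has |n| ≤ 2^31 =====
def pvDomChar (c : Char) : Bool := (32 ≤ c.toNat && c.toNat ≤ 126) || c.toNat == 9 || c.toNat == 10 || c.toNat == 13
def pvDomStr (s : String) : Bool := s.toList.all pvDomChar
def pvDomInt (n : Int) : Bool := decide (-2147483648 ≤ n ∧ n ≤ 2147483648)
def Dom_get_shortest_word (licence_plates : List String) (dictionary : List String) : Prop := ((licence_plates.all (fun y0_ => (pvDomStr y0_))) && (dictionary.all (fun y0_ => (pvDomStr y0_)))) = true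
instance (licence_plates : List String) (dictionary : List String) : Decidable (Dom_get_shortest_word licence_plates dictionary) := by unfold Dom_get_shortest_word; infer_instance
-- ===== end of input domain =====

-- B replaces A's per-plate scan (running min length, infinity sentinel, exact-length early break)
-- by one stable length sort of the dictionary followed by first-covering-word lookup — alternative algorithm, similar cost.


-- ===== PORT A =====
-- inner 'for word in dictionary' loop of A; math.inf is modelled as 'none' in the Option Int accumulator
def pvLoopA (lh : PySem.Dict Char Int) (lletters : List Char) :
    List String → String → Option Int → String
  | [], sw, _ => sw
  | w :: rest, sw, swl =>
    let word_hash := PySem.Dict.counter (PySem.Str.lower w).toList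
    let counter : Int :=
      lh.keys.foldl (fun c key => if lh.getD key 0 ≤ word_hash.getD key 0 then c + 1 else c) 0
    if counter = (lh.keys.length : Int) ∧ (lletters.length : Int) = PySem.Str.len w then
      w
    else
      let better : Bool := match swl with
        | none => true                -- math.inf > len(word) is always true
        | some m => decide (PySem.Str.len w < m)
      if counter = (lh.keys.length : Int) ∧ better = true then
        pvLoopA lh lletters rest w (some (PySem.Str.len w))
      else
        pvLoopA lh lletters rest sw swl

def get_shortest_word (licence_plates : List String) (dictionary : List String) : List String :=
  licence_plates.foldl (fun shortest_words_arr licence =>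
    let licence_letters := ((PySem.Str.lower licence).toList).filter PySem.Chars.isalpha
    if licence_letters.length = 0 then
      shortest_words_arr ++ [""]
    else
      let licence_hash := PySem.Dict.counter licence_letters
      shortest_words_arr ++ [pvLoopA licence_hash licence_letters dictionary "" none]) []

-- ===== PORT B =====
-- 'not (needed - Counter(w.lower()))': the Counter difference (positive parts) is empty
-- exactly when every needed letter occurs in w.lower() with at least the needed multiplicity
def pvCovers (need : PySem.Dict Char Int) (w : String) : Bool :=
  need.items.all (fun p => p.2 ≤ (PySem.Dict.counter (PySem.Str.lower w).toList).getD p.1 0)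

def get_shortest_word_alt (licence_plates : List String) (dictionary : List String) : List String :=
  let by_len := PySem.List.sorted dictionary PySem.Str.len
  licence_plates.map (fun licence =>
    let need := PySem.Dict.counter (((PySem.Str.lower licence).toList).filter PySem.Chars.isalpha)
    if need.items = [] then ""
    else (by_len.find? (pvCovers need)).getD "")    -- next((w for w in by_len if …), "")

-- ===== PRECONDITION & SPEC =====
def Spec_get_shortest_word (licence_plates : List String) (dictionary : List String) (out : List String) : Prop := out = get_shortest_word_alt licence_plates dictionary
instance (licence_plates : List String) (dictionary : List String) (out : List String) : Decidable (Spec_get_shortest_word licence_plates dictionary out) := by unfold Spec_get_shortest_word; infer_instance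

-- ===== CLAIM (what is proved, stated in full; the proofs are below) =====
def Claim_equal_get_shortest_word : Prop := ∀ (licence_plates : List String) (dictionary : List String), Dom_get_shortest_word licence_plates dictionary → Spec_get_shortest_word licence_plates dictionary (get_shortest_word licence_plates dictionary)

-- ===== LEMMAS AND PROOFS =====

-- the comparator of sorted(…, key=len) and the fold step of min(…, key=len)
def pvB (a b : String) : Bool := decide (PySem.Str.len a < PySem.Str.len b)

def pvMinStep (acc : Option String) (x : String) : Option String :=
  match acc with
  | none => some x
  | some m => if PySem.Str.len x < PySem.Str.len m then some x else some m

theorem pvMin?_eq_foldl (xs : List String) :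
    PySem.List.min? xs PySem.Str.len = xs.foldl pvMinStep none := by
  unfold PySem.List.min?
  apply PySem.List.foldl_congr_mem
  intro acc x _
  cases acc <;> rfl

theorem pvOfList_eq_nil_iff (ls : List Char) : PySem.Set.ofList ls = [] ↔ ls = [] := by
  constructor
  · intro h
    cases ls with
    | nil => rfl
    | cons c t =>
      exfalso
      have : c ∈ PySem.Set.ofList (c :: t) := (PySem.Set.mem_ofList _ _).2 (by simp)
      simp [h] at this
  · rintro rfl; rfl

theorem pvFold_const (l : List String) (sw : String)
    (h : ∀ x ∈ l, ¬ PySem.Str.len x < PySem.Str.len sw) :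
    l.foldl pvMinStep (some sw) = some sw := by
  induction l with
  | nil => rfl
  | cons x t ih =>
    have hx := h x (by simp)
    simp only [List.foldl_cons, pvMinStep, if_neg hx]
    exact ih (fun y hy => h y (by simp [hy]))

theorem pvCondA_iff (ls : List Char) (w : String) :
    ((PySem.Dict.counter ls).keys.foldl
        (fun c key => if (PySem.Dict.counter ls).getD key 0 ≤
            (PySem.Dict.counter (PySem.Str.lower w).toList).getD key 0 then c + 1 else c) (0 : Int)
      = ((PySem.Dict.counter ls).keys.length : Int))
    ↔ pvCovers (PySem.Dict.counter ls) w = true := by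
  rw [PySem.List.foldl_ite_add_one
      (p := fun key => (PySem.Dict.counter ls).getD key 0 ≤
        (PySem.Dict.counter (PySem.Str.lower w).toList).getD key 0)]
  rw [zero_add]
  constructor
  · intro h
    have hc : (PySem.Dict.counter ls).keys.countP
        (fun key => decide ((PySem.Dict.counter ls).getD key 0 ≤
          (PySem.Dict.counter (PySem.Str.lower w).toList).getD key 0))
        = (PySem.Dict.counter ls).keys.length := Nat.cast_inj.mp h
    have hall := List.countP_eq_length.1 hc
    simp only [pvCovers, List.all_eq_true, PySem.Dict.items_counter, List.mem_map]
    rintro p ⟨k, hk, rfl⟩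
    have := hall k (by rw [PySem.Dict.keys_counter]; exact hk)
    simp only [decide_eq_true_eq, PySem.Dict.getD_counter] at this
    simpa using this
  · intro h
    have hall : ∀ k ∈ (PySem.Dict.counter ls).keys,
        (fun key => decide ((PySem.Dict.counter ls).getD key 0 ≤
          (PySem.Dict.counter (PySem.Str.lower w).toList).getD key 0)) k = true := by
      intro k hk
      rw [PySem.Dict.keys_counter] at hk
      simp only [pvCovers, List.all_eq_true, PySem.Dict.items_counter, List.mem_map] at h
      have := h (k, (ls.count k : Int)) ⟨k, hk, rfl⟩
      simp only [decide_eq_true_eq, PySem.Dict.getD_counter]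
      simpa using this
    exact Nat.cast_inj.mpr (List.countP_eq_length.2 hall)

theorem pvCovers_length_le (ls : List Char) (w : String)
    (h : pvCovers (PySem.Dict.counter ls) w = true) :
    (ls.length : Int) ≤ PySem.Str.len w := by
  have hcnt : ∀ c ∈ ls.toFinset, ls.count c ≤ ((PySem.Str.lower w).toList).count c := by
    intro c hc
    simp only [pvCovers, List.all_eq_true, PySem.Dict.items_counter, List.mem_map] at h
    have hm : c ∈ PySem.Set.ofList ls := (PySem.Set.mem_ofList _ _).2 (List.mem_toFinset.1 hc)
    have := h (c, (ls.count c : Int)) ⟨c, hm, rfl⟩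
    simp only [PySem.Dict.getD_counter, decide_eq_true_eq] at this
    exact_mod_cast this
  have h1 : ls.length ≤ ((PySem.Str.lower w).toList).length := by
    calc ls.length = ∑ c ∈ ls.toFinset, ls.count c := (List.sum_toFinset_count_eq_length ls).symm
      _ ≤ ∑ c ∈ ls.toFinset, ((PySem.Str.lower w).toList).count c := Finset.sum_le_sum hcnt
      _ ≤ ∑ c ∈ ((PySem.Str.lower w).toList).toFinset, ((PySem.Str.lower w).toList).count c := by
          apply Finset.sum_le_sum_of_ne_zero
          intro c _ hne
          exact List.mem_toFinset.2 (List.count_pos_iff.1 (Nat.pos_of_ne_zero hne))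
      _ = ((PySem.Str.lower w).toList).length := List.sum_toFinset_count_eq_length _
  have h2 : ((PySem.Str.lower w).toList).length = w.toList.length := by
    simp [PySem.Str.toList_lower, PySem.Chars.lower]
  rw [PySem.Str.len_eq]
  omega

-- A's inner loop computes min(covering words, key=len, default="") with first-extremal ties
theorem pvLoop_general (ls : List Char) (ds : List String) :
    ∀ (sw : String) (swl : Option Int),
    (match swl with
     | none => sw = ""
     | some m => pvCovers (PySem.Dict.counter ls) sw = true ∧ PySem.Str.len sw = m ∧
         (ls.length : Int) < m) →
    pvLoopA (PySem.Dict.counter ls) ls ds sw swl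
      = ((ds.filter (pvCovers (PySem.Dict.counter ls))).foldl pvMinStep
          (swl.map (fun _ => sw))).getD "" := by
  induction ds with
  | nil =>
    rintro sw (_ | m) hinv
    · simpa [pvLoopA] using hinv.symm
    · simp [pvLoopA]
  | cons w rest ih =>
    intro sw swl hinv
    by_cases hPw : pvCovers (PySem.Dict.counter ls) w = true
    · have hfold := (pvCondA_iff ls w).mpr hPw
      have hle := pvCovers_length_le ls w hPw
      rw [List.filter_cons_of_pos hPw]
      by_cases hlen : ((ls.length : Int) = PySem.Str.len w)
      · rw [pvLoopA.eq_def]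
        simp only []
        rw [if_pos ⟨hfold, hlen⟩]
        have hstep : pvMinStep (swl.map (fun _ => sw)) w = some w := by
          cases swl with
          | none => rfl
          | some m =>
            obtain ⟨_, hswlen, hlt⟩ := hinv
            simp only [Option.map_some, pvMinStep, hswlen]
            rw [if_pos (by omega)]
        rw [List.foldl_cons, hstep]
        rw [pvFold_const _ _ (fun x hx => by
          have hx' := pvCovers_length_le ls x (List.of_mem_filter hx)
          omega)]
        rfl
      · rw [pvLoopA.eq_def]
        simp only []
        rw [if_neg (by tauto), List.foldl_cons]
        cases swl with
        | none =>
          rw [if_pos ⟨hfold, rfl⟩]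
          have h2 : pvMinStep none w = some w := rfl
          subst hinv
          rw [show (Option.map (fun _ => "") (none : Option Int)) = (none : Option String) from rfl, h2]
          exact ih w (some (PySem.Str.len w)) ⟨hPw, rfl, by omega⟩
        | some m =>
          obtain ⟨hsw, hswlen, hlt⟩ := hinv
          by_cases hwm : PySem.Str.len w < m
          · rw [if_pos ⟨hfold, decide_eq_true hwm⟩]
            have h2 : pvMinStep (some sw) w = some w := by
              simp only [pvMinStep, hswlen]; rw [if_pos hwm]
            simp only [Option.map_some]
            rw [h2]
            have := ih w (some (PySem.Str.len w)) ⟨hPw, rfl, by omega⟩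
            simpa using this
          · rw [if_neg (fun h => hwm (of_decide_eq_true h.2))]
            have h2 : pvMinStep (some sw) w = some sw := by
              simp only [pvMinStep, hswlen]; rw [if_neg hwm]
            simp only [Option.map_some] at *
            rw [h2]
            have := ih sw (some m) ⟨hsw, hswlen, hlt⟩
            simpa using this
    · have hfold : ¬ ((PySem.Dict.counter ls).keys.foldl
        (fun c key => if (PySem.Dict.counter ls).getD key 0 ≤
            (PySem.Dict.counter (PySem.Str.lower w).toList).getD key 0 then c + 1 else c) (0 : Int)
          = ((PySem.Dict.counter ls).keys.length : Int)) :=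
        fun h => hPw ((pvCondA_iff ls w).mp h)
      rw [pvLoopA.eq_def]
      simp only []
      rw [if_neg (by tauto), if_neg (by tauto), List.filter_cons_of_neg hPw]
      exact ih sw swl hinv

-- ---- bridge: min(filter, key=len, first extremal) = first match in the stable length sort ----

theorem pvFind?_eq_head?_filter (p : String → Bool) (l : List String) :
    l.find? p = (l.filter p).head? := by
  induction l with
  | nil => rfl
  | cons x t ih =>
    by_cases hx : p x = true
    · rw [List.find?_cons_of_pos hx, List.filter_cons_of_pos hx, List.head?_cons]
    · rw [List.find?_cons_of_neg hx, List.filter_cons_of_neg hx, ih]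

theorem pvHead?_insertBy (x : String) (ys : List String) :
    (PySem.List.insertBy pvB x ys).head? = pvMinStep ys.head? x := by
  cases ys with
  | nil => rfl
  | cons h t =>
    simp only [PySem.List.insertBy, pvMinStep, pvB]
    split_ifs with h1 <;> simp_all

theorem pvHead?_foldl_insertBy (xs : List String) :
    ∀ acc : List String,
    (xs.foldl (fun a x => PySem.List.insertBy pvB x a) acc).head? = xs.foldl pvMinStep acc.head? := by
  induction xs with
  | nil => intro acc; rfl
  | cons x t ih =>
    intro acc
    simp only [List.foldl_cons]
    rw [ih, pvHead?_insertBy]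

theorem pvInsertBy_all_before (x : String) (ys : List String)
    (h : ∀ z ∈ ys, pvB x z = true) :
    PySem.List.insertBy pvB x ys = x :: ys := by
  cases ys with
  | nil => rfl
  | cons y t => simp [PySem.List.insertBy, h y (by simp)]

theorem pvFilter_insertBy_neg (p : String → Bool) (x : String) (ys : List String)
    (hx : p x = false) :
    (PySem.List.insertBy pvB x ys).filter p = ys.filter p := by
  induction ys with
  | nil => simp [PySem.List.insertBy, List.filter, hx]
  | cons y t ih =>
    simp only [PySem.List.insertBy]
    split_ifs with h1
    · simp [List.filter_cons, hx]
    · by_cases hy : p y = true <;> simp [hy, ih]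

theorem pvFilter_insertBy_pos (p : String → Bool) (x : String) (ys : List String)
    (hx : p x = true)
    (hs : ys.Pairwise (fun a b => PySem.Str.len a ≤ PySem.Str.len b)) :
    (PySem.List.insertBy pvB x ys).filter p = PySem.List.insertBy pvB x (ys.filter p) := by
  induction ys with
  | nil => simp [PySem.List.insertBy, List.filter, hx]
  | cons y t ih =>
    obtain ⟨hy_le, ht⟩ := List.pairwise_cons.1 hs
    simp only [PySem.List.insertBy]
    split_ifs with h1
    · -- x goes right before y
      by_cases hy : p y = true
      · simp [hx, hy, PySem.List.insertBy, h1]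
      · simp only [Bool.not_eq_true] at hy
        rw [List.filter_cons_of_pos hx, List.filter_cons_of_neg (by simp [hy])]
        rw [pvInsertBy_all_before x _ (fun z hz => by
          have hz' : z ∈ t := List.mem_of_mem_filter hz
          have := hy_le z hz'
          have hxy : PySem.Str.len x < PySem.Str.len y := of_decide_eq_true h1
          simp only [pvB]
          exact decide_eq_true (by omega))]
    · by_cases hy : p y = true
      · rw [List.filter_cons_of_pos hy, List.filter_cons_of_pos hy]
        simp only [PySem.List.insertBy]
        rw [if_neg h1]
        rw [ih ht]
      · simp only [Bool.not_eq_true] at hy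
        rw [List.filter_cons_of_neg (by simp [hy]), List.filter_cons_of_neg (by simp [hy])]
        exact ih ht

theorem pvPairwise_insertBy (x : String) (ys : List String)
    (hs : ys.Pairwise (fun a b => PySem.Str.len a ≤ PySem.Str.len b)) :
    (PySem.List.insertBy pvB x ys).Pairwise (fun a b => PySem.Str.len a ≤ PySem.Str.len b) := by
  induction ys with
  | nil => simp [PySem.List.insertBy]
  | cons y t ih =>
    obtain ⟨hy_le, ht⟩ := List.pairwise_cons.1 hs
    simp only [PySem.List.insertBy]
    split_ifs with h1
    · have hxy : PySem.Str.len x < PySem.Str.len y := of_decide_eq_true h1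
      refine List.pairwise_cons.2 ⟨?_, hs⟩
      intro z hz
      rcases List.mem_cons.1 hz with rfl | hz
      · omega
      · have := hy_le z hz; omega
    · have hyx : PySem.Str.len y ≤ PySem.Str.len x := by
        simp only [pvB, decide_eq_true_eq] at h1; omega
      refine List.pairwise_cons.2 ⟨?_, ih ht⟩
      intro z hz
      rcases (PySem.List.mem_insertBy _ _ _ _).1 hz with rfl | hz
      · exact hyx
      · exact hy_le z hz

theorem pvFilter_foldl_insertBy (p : String → Bool) (xs : List String) :
    ∀ acc : List String, acc.Pairwise (fun a b => PySem.Str.len a ≤ PySem.Str.len b) →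
    ((xs.foldl (fun a x => PySem.List.insertBy pvB x a) acc).filter p)
      = (xs.filter p).foldl (fun a x => PySem.List.insertBy pvB x a) (acc.filter p) := by
  induction xs with
  | nil => intro acc _; rfl
  | cons x t ih =>
    intro acc hacc
    simp only [List.foldl_cons]
    by_cases hx : p x = true
    · rw [List.filter_cons_of_pos hx, List.foldl_cons,
          ih _ (pvPairwise_insertBy x acc hacc), pvFilter_insertBy_pos p x acc hx hacc]
    · simp only [Bool.not_eq_true] at hx
      rw [List.filter_cons_of_neg (by simp [hx]),
          ih _ (pvPairwise_insertBy x acc hacc), pvFilter_insertBy_neg p x acc hx]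

theorem pvSorted_eq_foldl (xs : List String) :
    PySem.List.sorted xs PySem.Str.len
      = xs.foldl (fun a x => PySem.List.insertBy pvB x a) [] := by
  rw [PySem.List.sorted_eq_foldl_insertBy]
  rfl

-- the heart of the equivalence: first covering word of the stable length sort
-- = first minimal-length element of the covering sublist
theorem pvFind_sorted_eq_minD (p : String → Bool) (xs : List String) :
    ((PySem.List.sorted xs PySem.Str.len).find? p).getD ""
      = PySem.List.minD (xs.filter p) PySem.Str.len "" := by
  rw [pvFind?_eq_head?_filter, pvSorted_eq_foldl,
      pvFilter_foldl_insertBy p xs [] (by simp),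
      pvHead?_foldl_insertBy]
  unfold PySem.List.minD
  rw [pvMin?_eq_foldl]
  rfl

def pvA1 (dict : List String) (licence : String) : String :=
  let ll := ((PySem.Str.lower licence).toList).filter PySem.Chars.isalpha
  if ll.length = 0 then "" else pvLoopA (PySem.Dict.counter ll) ll dict "" none

theorem pvElem_eq (dict : List String) (licence : String) :
    pvA1 dict licence
    = (if (PySem.Dict.counter (((PySem.Str.lower licence).toList).filter PySem.Chars.isalpha)).items = [] then ""
       else ((PySem.List.sorted dict PySem.Str.len).find?
          (pvCovers (PySem.Dict.counter (((PySem.Str.lower licence).toList).filter PySem.Chars.isalpha)))).getD "") := by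
  unfold pvA1
  by_cases h : ((PySem.Str.lower licence).toList).filter PySem.Chars.isalpha = []
  · rw [h]
    simp [PySem.Dict.items_counter]
  · have hlen : ¬ (((PySem.Str.lower licence).toList).filter PySem.Chars.isalpha).length = 0 := by
      simpa [List.length_eq_zero_iff] using h
    have hitems : ¬ (PySem.Dict.counter (((PySem.Str.lower licence).toList).filter PySem.Chars.isalpha)).items = [] := by
      rw [PySem.Dict.items_counter]
      intro hh
      exact h ((pvOfList_eq_nil_iff _).1 (List.map_eq_nil_iff.1 hh))
    rw [if_neg hlen, if_neg hitems, pvFind_sorted_eq_minD]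
    unfold PySem.List.minD
    rw [pvMin?_eq_foldl]
    exact pvLoop_general _ dict "" none rfl

-- ===== VERDICT (by name: the statement is the Claim_ definition above) =====
theorem get_shortest_word_spec : Claim_equal_get_shortest_word := by
  intro licence_plates dictionary _
  unfold Spec_get_shortest_word
  unfold get_shortest_word get_shortest_word_alt
  refine Eq.trans (PySem.List.foldl_congr_mem licence_plates _
    (fun acc licence => acc ++ [pvA1 dictionary licence]) []
    (by intro acc x _
        simp only [pvA1]
        split_ifs <;> rfl)) ?_
  rw [PySem.List.foldl_append_singleton_eq_map]
  simp only [List.nil_append]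
  refine List.map_congr_left ?_
  intro a _
  simpa using pvElem_eq dictionary a
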